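-- pv_equiv track=rewrite | github.com/tommy5410/ppp2025 | hw10/weather_class_during.py | get_rain_events
-- ===== SOURCE A (Python) =====
-- def get_rain_events(rainfalls):
--     events = []
--     continued_raindays = 0
--     for rain in rainfalls:
--         if rain > 0:
--             continued_raindays += 1
--         else:
--             if continued_raindays > 0:
--                 events.append(continued_raindays)
--             continued_raindays = 0
--     if continued_raindays > 0:
--         events.append(continued_raindays)
--     return events
-- ===== SOURCE B (Python) =====
-- from itertools import groupby
--
--
-- def get_rain_events(rainfalls):
--     return [sum(1 for _ in g) for k, g in groupby(rainfalls, key=lambda r: r > 0) if k]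
-- ===== Notes on version B (the rewrite author's own statement) =====
-- stated objective: idiomatic
-- what changed: Replaces the explicit running counter with post-loop flush by itertools.groupby partitioning into consecutive same-sign runs, keeping the lengths of the positive runs.
import Mathlib
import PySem

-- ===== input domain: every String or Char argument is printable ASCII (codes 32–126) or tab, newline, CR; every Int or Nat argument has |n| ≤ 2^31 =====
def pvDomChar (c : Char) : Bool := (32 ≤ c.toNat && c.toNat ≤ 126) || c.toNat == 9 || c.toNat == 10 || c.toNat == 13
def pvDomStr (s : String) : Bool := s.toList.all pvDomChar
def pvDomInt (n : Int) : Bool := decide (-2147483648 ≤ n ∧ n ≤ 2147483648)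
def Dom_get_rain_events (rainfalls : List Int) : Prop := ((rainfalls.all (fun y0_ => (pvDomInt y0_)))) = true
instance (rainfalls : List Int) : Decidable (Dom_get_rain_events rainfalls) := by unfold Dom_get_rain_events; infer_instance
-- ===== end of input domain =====

-- B groups the list into consecutive same-sign runs (itertools.groupby) and keeps the lengths of
-- the positive runs, instead of A's running counter with a post-loop flush (idiomatic; same cost).

-- ===== PORT A =====
-- the for-loop over (events, continued_raindays), then the final flush
def get_rain_events (rainfalls : List Int) : List Int :=
  let st := rainfalls.foldl
    (fun (s : List Int × Int) rain =>
      if rain > 0 then (s.1, s.2 + 1)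
      else ((if s.2 > 0 then s.1 ++ [s.2] else s.1), 0))
    ([], 0)
  if st.2 > 0 then st.1 ++ [st.2] else st.1

-- ===== PORT B =====
-- itertools.groupby(rainfalls, key=lambda r: r > 0): consecutive runs tagged with their key
def pvGroupByPos : List Int → List (Bool × List Int)
  | [] => []
  | x :: xs =>
    match pvGroupByPos xs with
    | [] => [(decide (x > 0), [x])]
    | (k, g) :: rest =>
      if decide (x > 0) = k then (k, x :: g) :: rest
      else (decide (x > 0), [x]) :: (k, g) :: rest

-- [sum(1 for _ in g) for k, g in groupby(...) if k]
def get_rain_events_alt (rainfalls : List Int) : List Int :=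
  (pvGroupByPos rainfalls).filterMap (fun p => if p.1 then some ((p.2.length : Int)) else none)

-- ===== PRECONDITION & SPEC =====
def Spec_get_rain_events (rainfalls : List Int) (out : List Int) : Prop := out = get_rain_events_alt rainfalls
instance (rainfalls : List Int) (out : List Int) : Decidable (Spec_get_rain_events rainfalls out) := by unfold Spec_get_rain_events; infer_instance

-- ===== CLAIM (what is proved, stated in full; the proofs are below) =====
def Claim_equal_get_rain_events : Prop := ∀ (rainfalls : List Int), Dom_get_rain_events rainfalls → Spec_get_rain_events rainfalls (get_rain_events rainfalls)

-- ===== LEMMAS AND PROOFS =====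

-- A's loop body, named for the proofs
def stepA (s : List Int × Int) (rain : Int) : List Int × Int :=
  if rain > 0 then (s.1, s.2 + 1)
  else ((if s.2 > 0 then s.1 ++ [s.2] else s.1), 0)

-- what A's loop computes from a pending positive-run count c over the rest of the input
def altAux (c : Int) : List Int → List Int
  | [] => if c > 0 then [c] else []
  | x :: xs => if x > 0 then altAux (c + 1) xs else (if c > 0 then [c] else []) ++ altAux 0 xs

def resB (gs : List (Bool × List Int)) : List Int :=
  gs.filterMap (fun p => if p.1 then some ((p.2.length : Int)) else none)

theorem foldl_stepA (xs : List Int) : ∀ (events : List Int) (c : Int),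
    (let st := xs.foldl stepA (events, c); if st.2 > 0 then st.1 ++ [st.2] else st.1)
      = events ++ altAux c xs := by
  induction xs with
  | nil =>
    intro events c
    simp only [List.foldl_nil, altAux]
    split_ifs <;> simp
  | cons x xs ih =>
    intro events c
    simp only [List.foldl_cons, altAux, stepA]
    by_cases hx : x > 0
    · simp [hx, ih]
    · simp only [hx, if_false]
      rw [ih]
      split_ifs <;> simp

theorem grp_altAux (xs : List Int) :
    resB (pvGroupByPos xs) = altAux 0 xs ∧
      ∀ c : Int, 0 < c →
        altAux c xs =
          (match pvGroupByPos xs with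
           | (true, g) :: rest => (c + (g.length : Int)) :: resB rest
           | gs => c :: resB gs) := by
  induction xs with
  | nil => exact ⟨rfl, fun c hc => by simp [altAux, hc, pvGroupByPos, resB]⟩
  | cons x xs ih =>
    obtain ⟨ih1, ih2⟩ := ih
    by_cases hx : x > 0
    · have hd : decide (x > 0) = true := decide_eq_true hx
      constructor
      · simp only [altAux, hx, if_true, zero_add]
        rw [ih2 1 one_pos]
        simp only [pvGroupByPos, hd]
        rcases hgs : pvGroupByPos xs with _ | ⟨⟨k, g⟩, rest⟩
        · simp [resB]
        · cases k <;> simp [resB] <;> push_cast <;> ring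
      · intro c hc
        simp only [altAux, hx, if_true]
        rw [ih2 (c + 1) (by omega)]
        simp only [pvGroupByPos, hd]
        rcases hgs : pvGroupByPos xs with _ | ⟨⟨k, g⟩, rest⟩
        · simp [resB]
        · cases k <;> simp [resB] <;> push_cast <;> ring
    · have hd : decide (x > 0) = false := decide_eq_false hx
      constructor
      · simp only [altAux, hx, if_false, lt_irrefl, List.nil_append]
        rw [← ih1]
        simp only [pvGroupByPos, hd]
        rcases hgs : pvGroupByPos xs with _ | ⟨⟨k, g⟩, rest⟩
        · simp [resB]
        · cases k <;> simp [resB]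
      · intro c hc
        simp only [altAux, hx, if_false, hc, if_true]
        rw [← ih1]
        simp only [pvGroupByPos, hd]
        rcases hgs : pvGroupByPos xs with _ | ⟨⟨k, g⟩, rest⟩
        · simp [resB]
        · cases k <;> simp [resB]

-- ===== VERDICT (by name: the statement is the Claim_ definition above) =====
theorem get_rain_events_spec : Claim_equal_get_rain_events := by
  intro rainfalls _
  show get_rain_events rainfalls = get_rain_events_alt rainfalls
  have h : get_rain_events rainfalls = [] ++ altAux 0 rainfalls := foldl_stepA rainfalls [] 0
  have h2 : get_rain_events_alt rainfalls = resB (pvGroupByPos rainfalls) := rfl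
  rw [h, h2, (grp_altAux rainfalls).1, List.nil_append]
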